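-- pv_equiv track=rewrite | github.com/meridianp/enterpriseland-investment | src/market_intelligence/utils/hubspot_import.py | map_industry_to_business_model
-- ===== SOURCE A (Python) =====
-- from typing import Optional, Dict, Any
--
-- def map_industry_to_business_model(industry: Optional[str]) -> str:
--     """
--     Map HubSpot industry to business model categories.
--
--     Args:
--         industry: Industry string from HubSpot
--
--     Returns:
--         Business model string suitable for TargetCompany
--     """
--     if not industry:
--         return 'other'
--
--     industry_lower = industry.lower()
--
--     # Education and student housing
--     if any(term in industry_lower for term in ['education', 'university', 'college', 'student']):
--         return 'operator'
--
--     # Real estate and development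
--     if any(term in industry_lower for term in ['real estate', 'property', 'development', 'construction']):
--         return 'developer'
--
--     # Technology
--     if any(term in industry_lower for term in ['technology', 'software', 'tech', 'it', 'computer']):
--         return 'technology'
--
--     # Investment and finance
--     if any(term in industry_lower for term in ['investment', 'finance', 'capital', 'fund', 'equity']):
--         return 'investor'
--
--     # Hospitality (relevant for student accommodation)
--     if any(term in industry_lower for term in ['hospitality', 'accommodation', 'hotel', 'housing']):
--         return 'operator'
--
--     # Telecommunications (from the data)
--     if 'telecom' in industry_lower:
--         return 'technology'
--
--     # Manufacturing and goods
--     if any(term in industry_lower for term in ['manufacturing', 'goods', 'retail', 'sporting']):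
--         return 'other'
--
--     return 'other'
-- ===== SOURCE B (Python) =====
-- KEYWORDS = [
--     ('education', 0, 'operator'), ('university', 0, 'operator'),
--     ('college', 0, 'operator'), ('student', 0, 'operator'),
--     ('real estate', 1, 'developer'), ('property', 1, 'developer'),
--     ('development', 1, 'developer'), ('construction', 1, 'developer'),
--     ('technology', 2, 'technology'), ('software', 2, 'technology'),
--     ('tech', 2, 'technology'), ('it', 2, 'technology'), ('computer', 2, 'technology'),
--     ('investment', 3, 'investor'), ('finance', 3, 'investor'),
--     ('capital', 3, 'investor'), ('fund', 3, 'investor'), ('equity', 3, 'investor'),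
--     ('hospitality', 4, 'operator'), ('accommodation', 4, 'operator'),
--     ('hotel', 4, 'operator'), ('housing', 4, 'operator'),
--     ('telecom', 5, 'technology'),
--     ('manufacturing', 6, 'other'), ('goods', 6, 'other'),
--     ('retail', 6, 'other'), ('sporting', 6, 'other'),
-- ]
--
-- def map_industry_to_business_model(industry):
--     if not industry:
--         return 'other'
--     s = industry.lower()
--     best = None  # minimal (priority, category) over ALL matching keywords
--     for kw, prio, cat in KEYWORDS:
--         if kw in s and (best is None or prio < best[0]):
--             best = (prio, cat)
--     return best[1] if best is not None else 'other'
-- ===== Notes on version B (the rewrite author's own statement) =====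
-- stated objective: alternative
-- what changed: Replaced A's sequential first-match if-chain with a min-reduction: a flat keyword->(priority,category) table is scanned in full and the category of the lowest-priority matching keyword is returned (no early return, no per-rule any()).
import Mathlib
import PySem

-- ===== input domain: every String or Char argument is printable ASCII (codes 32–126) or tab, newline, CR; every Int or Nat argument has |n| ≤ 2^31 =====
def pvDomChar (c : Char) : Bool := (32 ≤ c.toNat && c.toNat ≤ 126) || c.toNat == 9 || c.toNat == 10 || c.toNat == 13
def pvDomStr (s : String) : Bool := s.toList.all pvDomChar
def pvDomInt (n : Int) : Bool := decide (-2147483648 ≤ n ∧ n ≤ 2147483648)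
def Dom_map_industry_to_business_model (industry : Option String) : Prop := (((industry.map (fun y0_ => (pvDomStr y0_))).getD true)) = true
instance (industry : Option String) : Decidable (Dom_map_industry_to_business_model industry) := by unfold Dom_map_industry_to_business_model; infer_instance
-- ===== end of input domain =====

-- B replaces A's sequential first-match if-chain with a min-priority reduction over a
-- flat keyword table (objective: alternative; same cost).


-- ===== PORT A =====
def map_industry_to_business_model (industry : Option String) : String :=
  match industry with
  | none => "other"
  | some s =>
    if s = "" then "other"
    else
      let industry_lower := PySem.Str.lower s
      if ["education", "university", "college", "student"].any
          (fun term => PySem.Str.isIn term industry_lower) then "operator"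
      else if ["real estate", "property", "development", "construction"].any
          (fun term => PySem.Str.isIn term industry_lower) then "developer"
      else if ["technology", "software", "tech", "it", "computer"].any
          (fun term => PySem.Str.isIn term industry_lower) then "technology"
      else if ["investment", "finance", "capital", "fund", "equity"].any
          (fun term => PySem.Str.isIn term industry_lower) then "investor"
      else if ["hospitality", "accommodation", "hotel", "housing"].any
          (fun term => PySem.Str.isIn term industry_lower) then "operator"
      else if PySem.Str.isIn "telecom" industry_lower then "technology"
      else if ["manufacturing", "goods", "retail", "sporting"].any
          (fun term => PySem.Str.isIn term industry_lower) then "other"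
      else "other"

-- ===== PORT B =====
-- flat keyword -> (priority, category) table (KEYWORDS in Source B)
def pvKeywords : List (String × Nat × String) :=
  [("education", 0, "operator"), ("university", 0, "operator"),
   ("college", 0, "operator"), ("student", 0, "operator"),
   ("real estate", 1, "developer"), ("property", 1, "developer"),
   ("development", 1, "developer"), ("construction", 1, "developer"),
   ("technology", 2, "technology"), ("software", 2, "technology"),
   ("tech", 2, "technology"), ("it", 2, "technology"), ("computer", 2, "technology"),
   ("investment", 3, "investor"), ("finance", 3, "investor"),
   ("capital", 3, "investor"), ("fund", 3, "investor"), ("equity", 3, "investor"),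
   ("hospitality", 4, "operator"), ("accommodation", 4, "operator"),
   ("hotel", 4, "operator"), ("housing", 4, "operator"),
   ("telecom", 5, "technology"),
   ("manufacturing", 6, "other"), ("goods", 6, "other"),
   ("retail", 6, "other"), ("sporting", 6, "other")]

-- one step of the min-reduction ('if kw in s and (best is None or prio < best[0])')
def pvStep (lo : String) (best : Option (Nat × String)) (kpc : String × Nat × String) :
    Option (Nat × String) :=
  if PySem.Str.isIn kpc.1 lo &&
      (match best with | none => true | some pc => decide (kpc.2.1 < pc.1)) then
    some kpc.2
  else best

def map_industry_to_business_model_alt (industry : Option String) : String :=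
  match industry with
  | none => "other"
  | some s =>
    if s = "" then "other"
    else
      let lo := PySem.Str.lower s
      match pvKeywords.foldl (pvStep lo) none with
      | some pc => pc.2
      | none => "other"

-- ===== PRECONDITION & SPEC =====
def Spec_map_industry_to_business_model (industry : Option String) (out : String) : Prop := out = map_industry_to_business_model_alt industry
instance (industry : Option String) (out : String) : Decidable (Spec_map_industry_to_business_model industry out) := by unfold Spec_map_industry_to_business_model; infer_instance

-- ===== CLAIM (what is proved, stated in full; the proofs are below) =====
def Claim_equal_map_industry_to_business_model : Prop := ∀ (industry : Option String), Dom_map_industry_to_business_model industry → Spec_map_industry_to_business_model industry (map_industry_to_business_model industry)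

-- ===== LEMMAS AND PROOFS =====

-- Once the accumulator holds priority p, entries of priority ≥ p never replace it.
theorem pv_absorb (lo : String) (p : Nat) (c : String) :
    ∀ (L : List (String × Nat × String)), (∀ x ∈ L, p ≤ x.2.1) →
      L.foldl (pvStep lo) (some (p, c)) = some (p, c) := by
  intro L
  induction L with
  | nil => intro _; rfl
  | cons x xs ih =>
    intro h
    have hx : ¬ (x.2.1 < p) := not_lt.mpr (h x (List.mem_cons_self))
    have : pvStep lo (some (p, c)) x = some (p, c) := by
      simp [pvStep, hx]
    rw [List.foldl_cons, this]
    exact ih (fun y hy => h y (List.mem_cons_of_mem _ hy))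

-- Folding a priority-homogeneous group from 'none' is a first-match test for that group.
theorem pv_group (lo : String) (p : Nat) (c : String) :
    ∀ (kws : List String) (rest : List (String × Nat × String)),
      ((kws.map (fun k => (k, p, c))) ++ rest).foldl (pvStep lo) none =
        if kws.any (fun k => PySem.Str.isIn k lo) then
          rest.foldl (pvStep lo) (some (p, c))
        else rest.foldl (pvStep lo) none := by
  intro kws
  induction kws with
  | nil => intro rest; simp
  | cons k ks ih =>
    intro rest
    by_cases hk : PySem.Chars.isIn k.toList lo.toList
    · have h1 : pvStep lo none (k, p, c) = some (p, c) := by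
        simp [pvStep, PySem.Str.isIn, hk]
      have h2 : (ks.map (fun k => (k, p, c))).foldl (pvStep lo) (some (p, c)) = some (p, c) :=
        pv_absorb lo p c _ (by intro x hx; rcases List.mem_map.mp hx with ⟨y, _, rfl⟩; exact le_refl p)
      simp only [List.map_cons, List.cons_append, List.foldl_cons, h1, List.foldl_append, h2]
      simp [PySem.Str.isIn, hk]
    · have h1 : pvStep lo none (k, p, c) = none := by
        simp [pvStep, PySem.Str.isIn, hk]
      simp only [List.map_cons, List.cons_append, List.foldl_cons, h1, ih rest]
      simp [PySem.Str.isIn, hk]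

-- The ports agree everywhere.
theorem pv_agree (industry : Option String) :
    map_industry_to_business_model industry = map_industry_to_business_model_alt industry := by
  cases industry with
  | none => rfl
  | some s =>
    by_cases hs : s = ""
    · simp [map_industry_to_business_model, map_industry_to_business_model_alt, hs]
    · simp only [map_industry_to_business_model, map_industry_to_business_model_alt, hs, if_false]
      set lo := PySem.Str.lower s with hlo
      have hsplit : pvKeywords =
          (["education", "university", "college", "student"].map (fun k => (k, 0, "operator"))) ++
          ((["real estate", "property", "development", "construction"].map (fun k => (k, 1, "developer"))) ++
          ((["technology", "software", "tech", "it", "computer"].map (fun k => (k, 2, "technology"))) ++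
          ((["investment", "finance", "capital", "fund", "equity"].map (fun k => (k, 3, "investor"))) ++
          ((["hospitality", "accommodation", "hotel", "housing"].map (fun k => (k, 4, "operator"))) ++
          ((["telecom"].map (fun k => (k, 5, "technology"))) ++
          ((["manufacturing", "goods", "retail", "sporting"].map (fun k => (k, 6, "other")))
            ++ ([] : List (String × Nat × String)))))))) := by rfl
      rw [hsplit]
      rw [pv_group, pv_group, pv_group, pv_group, pv_group, pv_group, pv_group]
      split_ifs with h1 h2 h3 h4 h5 h6 h7 <;>
        first
        | (rw [pv_absorb lo _ _ _ (by intro x hx; fin_cases hx <;> simp)])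
        | skip
      all_goals simp_all

-- ===== VERDICT (by name: the statement is the Claim_ definition above) =====
theorem map_industry_to_business_model_spec : Claim_equal_map_industry_to_business_model := by
  intro industry _
  exact pv_agree industry
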